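-- pv_equiv track=rewrite | github.com/MuhammadTausif/code-signal | arcade/1. Intro (60)/10. Eruption of Light (5-3)/46- Elections Winners.py | solution
-- ===== SOURCE A (Python) =====
-- def solution(votes, k):
--     x = max(votes)
--     cnt = votes.count(x)
--     ret = 0
--     for i in votes:
--         if i + k > x or (i == x and cnt == 1):
--             ret += 1
--     return ret
-- ===== SOURCE B (Python) =====
-- def solution(votes, k):
--     s = sorted(votes, reverse=True)
--     x = s[0]
--     if k <= 0:
--         # winner iff the maximum is unique
--         return 1 if len(s) == 1 or s[1] < x else 0
--     n = 0
--     for v in s: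
--         if v + k <= x:
--             break
--         n += 1
--     return n
-- ===== Notes on version B (the rewrite author's own statement) =====
-- stated objective: alternative
-- what changed: B sorts the votes in descending order and reads the answer off the sorted list: the head is the leader, the second element decides max-uniqueness when k <= 0, and for k > 0 a front scan with early break counts the winning prefix; A's max/count passes and single loop with a compound condition are gone. Pre_ excludes the empty list, on which A raises ValueError.
-- outside the precondition, e.g. on solution([], 0): A raises ValueError, B raises IndexError
import Mathlib
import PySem

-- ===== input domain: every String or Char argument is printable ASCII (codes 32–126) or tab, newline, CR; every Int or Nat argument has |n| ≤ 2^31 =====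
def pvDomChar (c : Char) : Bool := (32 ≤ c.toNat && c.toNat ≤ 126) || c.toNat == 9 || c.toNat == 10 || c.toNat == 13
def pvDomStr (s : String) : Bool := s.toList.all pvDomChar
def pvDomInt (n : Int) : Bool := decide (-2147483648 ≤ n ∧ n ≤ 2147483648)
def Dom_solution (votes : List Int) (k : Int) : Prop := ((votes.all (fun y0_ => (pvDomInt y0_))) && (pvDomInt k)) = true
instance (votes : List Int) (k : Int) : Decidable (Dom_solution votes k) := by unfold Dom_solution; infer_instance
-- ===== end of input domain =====

-- B sorts the votes descending and reads the answer off the sorted list (second element for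
-- max-uniqueness when k <= 0, an early-break front scan for k > 0) instead of A's max/count
-- passes plus one loop with a compound condition.

-- ===== PORT A =====
def solution (votes : List Int) (k : Int) : Int :=
  match PySem.List.max? votes (fun y => y) with
  | none => 0  -- unreachable under Pre_: Python raises ValueError on max([])
  | some x =>
    let cnt : Int := (PySem.List.count votes x : Int)
    votes.foldl (fun ret i => if i + k > x ∨ (i = x ∧ cnt = 1) then ret + 1 else ret) 0

-- ===== PORT B =====
-- the for-loop with break: count elements from the front while v + k > x
def countLead (x k : Int) : List Int → Int
  | [] => 0
  | v :: rest => if v + k ≤ x then 0 else countLead x k rest + 1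

def solution_alt (votes : List Int) (k : Int) : Int :=
  match PySem.List.sorted votes (fun y => y) true with
  | [] => 0  -- unreachable under Pre_: Python raises IndexError on s[0]
  | x :: rest =>
    if k ≤ 0 then
      -- len(s) == 1 or s[1] < x
      match rest with
      | [] => 1
      | r :: _ => if r < x then 1 else 0
    else
      countLead x k (x :: rest)

-- ===== PRECONDITION & SPEC =====
-- Pre_ excludes only the empty list, on which A's max(votes) raises ValueError (and B's s[0] an IndexError).
def Pre_solution (votes : List Int) (_k : Int) : Prop := votes ≠ []
instance (votes : List Int) (k : Int) : Decidable (Pre_solution votes k) := by unfold Pre_solution; infer_instance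
def pvWitness_solution : List Int × Int := ([2, 3, 5, 2], 3)

def Spec_solution (votes : List Int) (k : Int) (out : Int) : Prop := out = solution_alt votes k
instance (votes : List Int) (k : Int) (out : Int) : Decidable (Spec_solution votes k out) := by unfold Spec_solution; infer_instance

-- ===== CLAIM (what is proved, stated in full; the proofs are below) =====
def Claim_equal_solution : Prop := ∀ (votes : List Int) (k : Int), Dom_solution votes k → Pre_solution votes k → Spec_solution votes k (solution votes k)

-- ===== LEMMAS AND PROOFS =====

-- A's foldl equals the count of the compound condition
theorem solnA_eq_countP (votes : List Int) (k x cnt : Int) :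
    votes.foldl (fun (ret : Int) i => if i + k > x ∨ (i = x ∧ cnt = 1) then ret + 1 else ret) 0
    = (votes.countP (fun i => decide (i + k > x ∨ (i = x ∧ cnt = 1))) : Int) := by
  rw [PySem.List.foldl_ite_add_one]
  simp

-- on a descending list, the early-break scan counts exactly the elements with v + k > x
theorem countLead_eq_countP (x k : Int) (l : List Int)
    (hd : l.Pairwise (fun a b => b ≤ a)) :
    countLead x k l = (l.countP (fun v => decide (x < v + k)) : Int) := by
  induction l with
  | nil => simp [countLead]
  | cons v t ih =>
    rcases List.pairwise_cons.mp hd with ⟨hv, ht⟩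
    by_cases h : v + k ≤ x
    · have hz : t.countP (fun v => decide (x < v + k)) = 0 := by
        rw [List.countP_eq_zero]
        intro a ha
        have := hv a ha
        simp only [decide_eq_true_eq]
        omega
      simp [countLead, h, hz]
    · simp only [countLead, if_neg h, ih ht, List.countP_cons]
      have : decide (x < v + k) = true := by simp; omega
      simp [this]

theorem solution_spec : Claim_equal_solution := by
  intro votes k _ hpre
  unfold Spec_solution solution solution_alt
  -- name the sorted list and its head
  rcases hs : PySem.List.sorted votes (fun y => y) true with _ | ⟨x, rest⟩
  · exact absurd ((PySem.List.sorted_eq_nil_iff votes (fun y => y) true).mp hs) hpre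
  have hperm : (x :: rest).Perm votes := hs ▸ PySem.List.sorted_perm votes _ true
  have hxmem : x ∈ votes := hperm.mem_iff.mp (by simp)
  have hmax : ∀ y ∈ votes, y ≤ x := PySem.List.key_head_sorted_rev_ge votes (fun y => y) hs
  have hdesc : (x :: rest).Pairwise (fun a b : Int => b ≤ a) := by
    have := PySem.List.sorted_pairwise_rev votes (fun y : Int => y) (κ := Int)
    rwa [hs] at this
  -- A's max? is x
  obtain ⟨m, hm⟩ : ∃ m, PySem.List.max? votes (fun y => y) = some m := by
    rcases h : PySem.List.max? votes (fun y => y) with _ | m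
    · exact absurd ((PySem.List.max?_eq_none_iff votes (fun y => y)).mp h) hpre
    · exact ⟨m, rfl⟩
  have hmx : m = x := by
    have h1 : m ≤ x := hmax m (PySem.List.max?_mem hm)
    have h2 : x ≤ m := PySem.List.max?_isMax hm x hxmem
    omega
  rw [hm]
  dsimp only
  rw [hmx]
  rw [solnA_eq_countP]
  have hcount : PySem.List.count votes x = List.count x votes := PySem.List.count_eq votes x
  have hcnt_perm : List.count x votes = List.count x (x :: rest) := (hperm.count_eq x).symm
  by_cases hk : k ≤ 0
  · -- no one can gain: answer is 1 iff the max is unique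
    rw [if_pos hk]
    have hnobeat : ∀ i ∈ votes, ¬ (i + k > x) := by
      intro i hi; have := hmax i hi; omega
    have hcond : votes.countP (fun i => decide (i + k > x ∨ (i = x ∧ (PySem.List.count votes x : Int) = 1)))
        = votes.countP (fun i => decide (i = x ∧ (PySem.List.count votes x : Int) = 1)) := by
      apply List.countP_congr
      intro a ha
      have := hnobeat a ha
      simp only [decide_eq_true_eq]
      tauto
    rw [hcond]
    have hcongr1 : (PySem.List.count votes x : Int) = 1 →
        votes.countP (fun i => decide (i = x ∧ (PySem.List.count votes x : Int) = 1)) = List.count x votes := by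
      intro hc1
      rw [List.count_eq_countP]
      apply List.countP_congr
      intro a _
      have hcN : List.count x votes = 1 := by rw [← hcount]; exact_mod_cast hc1
      simp [hcN]
    rcases hrest : rest with _ | ⟨r, t⟩
    · -- singleton list: the max is unique
      dsimp only
      have hc1 : (PySem.List.count votes x : Int) = 1 := by
        rw [hcount, hcnt_perm, hrest]; simp
      rw [hcongr1 hc1, hcnt_perm, hrest]
      simp
    · subst hrest
      dsimp only
      have hrx : r ≤ x := (List.pairwise_cons.mp hdesc).1 r (by simp)
      by_cases hr : r < x
      · -- strictly smaller runner-up: unique max, answer 1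
        rw [if_pos hr]
        have hrt : ∀ y ∈ r :: t, y ≤ r := by
          intro y hy
          rcases List.mem_cons.mp hy with h | h
          · omega
          · exact (List.pairwise_cons.mp (List.pairwise_cons.mp hdesc).2).1 y h
        have hcrest : List.count x (r :: t) = 0 := by
          rw [List.count_eq_zero]
          intro hmem
          have := hrt x hmem; omega
        have hc1 : (PySem.List.count votes x : Int) = 1 := by
          rw [hcount, hcnt_perm, List.count_cons_self, hcrest]; simp
        rw [hcongr1 hc1, hcnt_perm, List.count_cons_self, hcrest]
        simp
      · -- tied max: the tie clause never fires, answer 0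
        rw [if_neg hr]
        have hrxe : r = x := by omega
        have hc2 : (PySem.List.count votes x : Int) ≠ 1 := by
          rw [hcount, hcnt_perm, List.count_cons_self, hrxe, List.count_cons_self]
          push_cast
          omega
        have h0 : votes.countP (fun i => decide (i = x ∧ (PySem.List.count votes x : Int) = 1)) = 0 := by
          rw [List.countP_eq_zero]
          intro a _
          simp only [decide_eq_true_eq]
          tauto
        rw [h0]
        simp
  · -- k > 0: the tie clause is subsumed by i + k > x
    rw [if_neg hk]
    have h1 : votes.countP (fun i => decide (i + k > x ∨ (i = x ∧ (PySem.List.count votes x : Int) = 1)))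
        = votes.countP (fun v => decide (x < v + k)) := by
      apply List.countP_congr
      intro a _
      simp only [decide_eq_true_eq]
      constructor
      · rintro (h | ⟨rfl, -⟩) <;> omega
      · intro h; left; omega
    rw [h1, countLead_eq_countP x k _ hdesc, ← hperm.countP_eq]
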